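-- pv_equiv track=rewrite | github.com/sruthikakarla276/PYTHON | TIME.py | total_time
-- ===== SOURCE A (Python) =====
-- def total_time(x,y,z):
--     h=0
--     m=0
--     while h<x:
--         m+=1
--         h+=y
--         if h>=x:
--             break
--         m+=1
--         h-=z
--     return m
-- ===== SOURCE B (Python) =====
-- def total_time(x, y, z):
--     # Closed form: no simulation loop.
--     if x <= 0:
--         return 0
--     if y >= x:
--         return 1
--     d = y - z  # net gain per full up-down cycle; > 0 whenever A terminates
--     k1 = -((-(x - z)) // d)  # first cycle whose up-step reaches x
--     k2 = -((-x) // d)        # first cycle whose down-check reaches x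
--     return 2 * k1 - 1 if k1 <= k2 else 2 * k2
-- ===== Notes on version B (the rewrite author's own statement) =====
-- stated objective: alternative
-- what changed: Replaced A's step-by-step while-loop simulation of the climb with a loop-free closed form using two ceiling divisions (first cycle whose up-step reaches x vs. first whose down-check does).
import Mathlib
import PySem

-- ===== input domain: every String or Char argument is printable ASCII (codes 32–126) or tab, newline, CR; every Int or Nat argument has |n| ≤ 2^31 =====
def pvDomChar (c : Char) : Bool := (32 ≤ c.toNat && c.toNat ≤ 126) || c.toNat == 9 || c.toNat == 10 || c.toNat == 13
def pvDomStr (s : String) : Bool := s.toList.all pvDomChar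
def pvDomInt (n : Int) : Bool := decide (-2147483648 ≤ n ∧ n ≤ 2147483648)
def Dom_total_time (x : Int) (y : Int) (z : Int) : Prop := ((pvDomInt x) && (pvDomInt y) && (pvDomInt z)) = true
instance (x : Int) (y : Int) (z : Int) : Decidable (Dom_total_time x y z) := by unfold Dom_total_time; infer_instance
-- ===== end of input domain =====

-- B replaces A's step-by-step climb simulation by a loop-free closed form (ceil divisions).

-- ===== PORT A =====
-- A's while loop, with fuel as termination device (fuel = x.toNat + 1 is enough
-- on every input satisfying Pre_total_time; on other inputs the Python loop never ends).
def total_time_loop (x y z : Int) : Nat → Int → Int → Int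
  | 0, _, m => m
  | Nat.succ f, h, m =>
    if h < x then
      let m1 := m + 1
      let h1 := h + y
      if h1 ≥ x then m1
      else total_time_loop x y z f (h1 - z) (m1 + 1)
    else m

def total_time (x : Int) (y : Int) (z : Int) : Int :=
  total_time_loop x y z (x.toNat + 1) 0 0

-- ===== PORT B =====
def total_time_alt (x : Int) (y : Int) (z : Int) : Int :=
  if x ≤ 0 then 0
  else if y ≥ x then 1
  else
    let d := y - z
    let k1 := -(PySem.Int.floordiv (-(x - z)) d)
    let k2 := -(PySem.Int.floordiv (-x) d)
    if k1 ≤ k2 then 2 * k1 - 1 else 2 * k2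

-- ===== PRECONDITION & SPEC =====
-- Pre_ excludes exactly the inputs on which A's while loop never terminates
-- (x > 0, y < x and y ≤ z: each full cycle gains y - z ≤ 0, so h never reaches x).
def Pre_total_time (x : Int) (y : Int) (z : Int) : Prop := x ≤ 0 ∨ x ≤ y ∨ z < y
instance (x : Int) (y : Int) (z : Int) : Decidable (Pre_total_time x y z) := by
  unfold Pre_total_time; infer_instance

def pvWitness_total_time : Int × Int × Int := (10, 3, 1)

def Spec_total_time (x : Int) (y : Int) (z : Int) (out : Int) : Prop := out = total_time_alt x y z
instance (x : Int) (y : Int) (z : Int) (out : Int) : Decidable (Spec_total_time x y z out) := by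
  unfold Spec_total_time; infer_instance

-- ===== CLAIM (what is proved, stated in full; the proofs are below) =====
def Claim_equal_total_time : Prop := ∀ (x : Int) (y : Int) (z : Int), Dom_total_time x y z → Pre_total_time x y z → Spec_total_time x y z (total_time x y z)

-- ===== LEMMAS AND PROOFS =====

-- ceilDiv a d := -((-a).fdiv d) characterisation for d > 0: d*(q-1) < a ≤ d*q.
lemma ceil_char (a d : Int) (hd : 0 < d) :
    d * (-(PySem.Int.floordiv (-a) d) - 1) < a ∧ a ≤ d * (-(PySem.Int.floordiv (-a) d)) := by
  have h := Int.mul_fdiv_add_fmod (-a) d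
  have h0 : 0 ≤ (-a).fmod d := Int.fmod_nonneg_of_pos _ hd
  have h1 : (-a).fmod d < d := Int.fmod_lt_of_pos _ hd
  simp only [PySem.Int.floordiv]
  constructor <;> nlinarith [h, h0, h1]

-- uniqueness: if d*(k-1) < a ≤ d*k then k is the ceil division.
lemma ceil_unique (a d k : Int) (hd : 0 < d) (h1 : d * (k - 1) < a) (h2 : a ≤ d * k) :
    -(PySem.Int.floordiv (-a) d) = k := by
  obtain ⟨c1, c2⟩ := ceil_char a d hd
  set q := -(PySem.Int.floordiv (-a) d)
  have hk : q - 1 < k := by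
    have : d * (q - 1) < d * k := lt_of_lt_of_le c1 h2
    exact lt_of_mul_lt_mul_left this (le_of_lt hd)
  have hk' : k - 1 < q := by
    have : d * (k - 1) < d * q := lt_of_lt_of_le h1 c2
    exact lt_of_mul_lt_mul_left this (le_of_lt hd)
  omega

-- shift: ceilDiv (a - d) d = ceilDiv a d - 1.
lemma ceil_shift (a d : Int) (hd : 0 < d) :
    -(PySem.Int.floordiv (-(a - d)) d) = -(PySem.Int.floordiv (-a) d) - 1 := by
  obtain ⟨c1, c2⟩ := ceil_char a d hd
  exact ceil_unique (a - d) d (-(PySem.Int.floordiv (-a) d) - 1) hd (by nlinarith) (by nlinarith)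

-- recurrence of the closed form: one full up-down cycle costs 2 steps.
lemma alt_rec (y z r : Int) (hz : z < y) (hr0 : 0 < r) (hry : y < r) :
    total_time_alt r y z = 2 + total_time_alt (r - (y - z)) y z := by
  have hd : 0 < y - z := by omega
  simp only [total_time_alt]
  rw [if_neg (by omega), if_neg (by omega)]
  set d := y - z with hdd
  by_cases hA : r - d ≤ 0
  · -- the very next up-step would overshoot only via the while check: answer 2
    rw [if_pos hA]
    have hk2 : -(PySem.Int.floordiv (-r) d) = 1 :=
      ceil_unique r d 1 hd (by nlinarith) (by nlinarith)
    have hk1 : 1 < -(PySem.Int.floordiv (-(r - z)) d) := by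
      obtain ⟨c1, c2⟩ := ceil_char (r - z) d hd
      nlinarith
    rw [hk2, if_neg (by omega)]; norm_num
  · rw [if_neg hA]
    by_cases hB : y ≥ r - d
    · -- one more cycle then a single up-step: answer 3
      rw [if_pos hB]
      have hk1 : -(PySem.Int.floordiv (-(r - z)) d) = 2 :=
        ceil_unique (r - z) d 2 hd (by nlinarith) (by nlinarith)
      have hk2 : 2 ≤ -(PySem.Int.floordiv (-r) d) := by
        obtain ⟨c1, c2⟩ := ceil_char r d hd
        nlinarith
      rw [hk1, if_pos (by omega)]; norm_num
    · rw [if_neg hB]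
      have s1 : -(PySem.Int.floordiv (-(r - d - z)) d) = -(PySem.Int.floordiv (-(r - z)) d) - 1 := by
        have := ceil_shift (r - z) d hd
        rw [show r - d - z = (r - z) - d by ring]; exact this
      have s2 : -(PySem.Int.floordiv (-(r - d)) d) = -(PySem.Int.floordiv (-r) d) - 1 :=
        ceil_shift r d hd
      rw [s1, s2]
      by_cases hle : -(PySem.Int.floordiv (-(r - z)) d) ≤ -(PySem.Int.floordiv (-r) d)
      · rw [if_pos hle, if_pos (by omega)]; ring
      · rw [if_neg hle, if_neg (by omega)]; ring

-- loop invariant: with z < y and enough fuel, the loop returns m plus the closed form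
-- of the remaining distance x - h.
lemma loop_eq (x y z : Int) (hz : z < y) :
    ∀ (f : Nat) (h m : Int), (x - h).toNat < f →
      total_time_loop x y z f h m = m + total_time_alt (x - h) y z := by
  intro f
  induction f with
  | zero => intro h m hf; omega
  | succ f ih =>
    intro h m hf
    simp only [total_time_loop]
    by_cases hlt : h < x
    · rw [if_pos hlt]
      by_cases hge : h + y ≥ x
      · rw [if_pos hge]
        have : total_time_alt (x - h) y z = 1 := by
          simp only [total_time_alt]
          rw [if_neg (by omega), if_pos (by omega)]
        rw [this]
      · rw [if_neg hge]
        have hrec := ih (h + y - z) (m + 1 + 1) (by omega)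
        rw [hrec]
        have := alt_rec y z (x - h) hz (by omega) (by omega)
        rw [show x - (h + y - z) = (x - h) - (y - z) by ring] at hrec ⊢
        omega
    · rw [if_neg hlt]
      have : total_time_alt (x - h) y z = 0 := by
        simp only [total_time_alt]; rw [if_pos (by omega)]
      rw [this]; omega

-- ===== VERDICT (by name: the statement is the Claim_ definition above) =====
theorem total_time_spec : Claim_equal_total_time := by
  intro x y z _ hpre
  unfold Spec_total_time total_time
  by_cases hz : z < y
  · have := loop_eq x y z hz (x.toNat + 1) 0 0 (by omega)
    simpa using this
  · -- Pre forces x ≤ 0 or x ≤ y; the loop runs at most once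
    rcases hpre with hx | hxy | h
    · have hf : 1 ≤ x.toNat + 1 := by omega
      obtain ⟨f, hf'⟩ : ∃ f, x.toNat + 1 = f + 1 := ⟨x.toNat, rfl⟩
      rw [hf']
      simp only [total_time_loop]
      rw [if_neg (by omega)]
      simp only [total_time_alt]
      rw [if_pos hx]
    · obtain ⟨f, hf'⟩ : ∃ f, x.toNat + 1 = f + 1 := ⟨x.toNat, rfl⟩
      rw [hf']
      simp only [total_time_loop]
      by_cases hx0 : (0 : Int) < x
      · rw [if_pos hx0, if_pos (by omega)]
        norm_num
        simp only [total_time_alt]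
        rw [if_neg (by omega), if_pos (by omega)]
      · rw [if_neg (by omega)]
        simp only [total_time_alt]
        rw [if_pos (by omega)]
    · omega
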